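-- pv_equiv track=rewrite | github.com/gafea/uni | checking_function_course.py | qualiMapping
-- ===== SOURCE A (Python) =====
-- def qualiMapping(exam, gradeQ, gradeU):
--     match exam:
--         case "HKDSE":
--             level = ["5**", "5*", "5", "4", "3", "2", "1", "U"]
--
--         case _:
--             return False
--
--     for i in level:
--         if i == gradeU:
--             return True
--         if i == gradeQ:
--             return False
-- ===== SOURCE B (Python) =====
-- def qualiMapping(exam, gradeQ, gradeU):
--     if exam != "HKDSE":
--         return False
--     level = ["5**", "5*", "5", "4", "3", "2", "1", "U"]
--     rank = {g: i for i, g in enumerate(level)}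
--     n = len(level)
--     return rank.get(gradeU, n) <= rank.get(gradeQ, n)
-- ===== Notes on version B (the rewrite author's own statement) =====
-- stated objective: idiomatic
-- what changed: Replaces A's early-return scan over the grade list with a rank dictionary built once; the result is a single comparison rank[gradeU] <= rank[gradeQ] with the list length as the rank of an absent grade.
-- outside the precondition, e.g. on qualiMapping('HKDSE', 'X', 'Y'): A returns None, B returns True
import Mathlib
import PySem

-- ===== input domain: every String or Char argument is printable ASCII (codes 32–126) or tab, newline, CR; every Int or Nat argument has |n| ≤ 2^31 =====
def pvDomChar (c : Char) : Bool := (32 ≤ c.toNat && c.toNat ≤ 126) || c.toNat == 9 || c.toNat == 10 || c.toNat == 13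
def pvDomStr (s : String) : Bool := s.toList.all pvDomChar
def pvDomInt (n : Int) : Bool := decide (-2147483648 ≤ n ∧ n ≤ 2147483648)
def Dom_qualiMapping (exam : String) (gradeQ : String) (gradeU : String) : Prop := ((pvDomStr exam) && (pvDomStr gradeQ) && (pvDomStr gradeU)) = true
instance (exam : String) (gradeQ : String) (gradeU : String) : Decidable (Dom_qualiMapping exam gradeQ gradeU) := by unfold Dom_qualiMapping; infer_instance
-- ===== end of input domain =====

-- B replaces A's early-return scan by a rank dictionary built once and a single
-- comparison of ranks (absent grade ranks as len(level)); idiomatic, not faster.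

-- ===== PORT A =====
-- the for-loop of A: early return True on gradeU, False on gradeQ; the
-- fall-through (Python returns None) is excluded by Pre_ and mapped to false here.
def pvLoopA (gradeQ : String) (gradeU : String) : List String → Bool
  | [] => false
  | i :: rest =>
    if i == gradeU then true
    else if i == gradeQ then false
    else pvLoopA gradeQ gradeU rest

def qualiMapping (exam : String) (gradeQ : String) (gradeU : String) : Bool :=
  if exam == "HKDSE" then
    pvLoopA gradeQ gradeU ["5**", "5*", "5", "4", "3", "2", "1", "U"]
  else
    false

-- ===== PORT B =====
def qualiMapping_alt (exam : String) (gradeQ : String) (gradeU : String) : Bool :=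
  if exam != "HKDSE" then false
  else
    let level : List String := ["5**", "5*", "5", "4", "3", "2", "1", "U"]
    let rank : PySem.Dict String Int :=
      (PySem.List.enumerate level).foldl (fun d p => d.insert p.2 p.1) PySem.Dict.empty
    let n : Int := level.length
    decide (rank.getD gradeU n ≤ rank.getD gradeQ n)

-- ===== PRECONDITION & SPEC =====
-- Pre_ excludes only the inputs where A falls off the loop and returns None
-- (not a Bool): exam = "HKDSE" with neither grade in the HKDSE level list.
def Pre_qualiMapping (exam : String) (gradeQ : String) (gradeU : String) : Prop :=
  exam = "HKDSE" →
    (gradeU ∈ ["5**", "5*", "5", "4", "3", "2", "1", "U"] ∨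
     gradeQ ∈ ["5**", "5*", "5", "4", "3", "2", "1", "U"])
instance (exam : String) (gradeQ : String) (gradeU : String) : Decidable (Pre_qualiMapping exam gradeQ gradeU) := by unfold Pre_qualiMapping; infer_instance

def pvWitness_qualiMapping : String × String × String := ("HKDSE", "3", "5")

def Spec_qualiMapping (exam : String) (gradeQ : String) (gradeU : String) (out : Bool) : Prop := out = qualiMapping_alt exam gradeQ gradeU
instance (exam : String) (gradeQ : String) (gradeU : String) (out : Bool) : Decidable (Spec_qualiMapping exam gradeQ gradeU out) := by unfold Spec_qualiMapping; infer_instance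

-- ===== CLAIM (what is proved, stated in full; the proofs are below) =====
def Claim_equal_qualiMapping : Prop := ∀ (exam : String) (gradeQ : String) (gradeU : String), Dom_qualiMapping exam gradeQ gradeU → Pre_qualiMapping exam gradeQ gradeU → Spec_qualiMapping exam gradeQ gradeU (qualiMapping exam gradeQ gradeU)

-- ===== LEMMAS AND PROOFS =====

-- first-occurrence index, with absent mapped to the list length
def pvIdx (g : String) : List String → Int
  | [] => 0
  | a :: t => if a == g then 0 else 1 + pvIdx g t

theorem pvIdx_nonneg (g : String) (l : List String) : 0 ≤ pvIdx g l := by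
  induction l with
  | nil => simp [pvIdx]
  | cons a t ih => simp only [pvIdx]; split <;> omega

-- A's scan decides the rank comparison, provided some grade occurs in the list
theorem pvLoopA_eq_idx (l : List String) (gQ gU : String)
    (h : gU ∈ l ∨ gQ ∈ l) :
    pvLoopA gQ gU l = decide (pvIdx gU l ≤ pvIdx gQ l) := by
  induction l with
  | nil => simp at h
  | cons a t ih =>
    by_cases hu : a = gU
    · subst hu
      have h0 := pvIdx_nonneg gQ (a :: t)
      have e : pvIdx a (a :: t) = 0 := by simp [pvIdx]
      simp only [pvLoopA, beq_self_eq_true, if_true, e]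
      exact (decide_eq_true h0).symm
    · have hu' : (a == gU) = false := by simp [hu]
      by_cases hq : a = gQ
      · subst hq
        have eq0 : pvIdx a (a :: t) = 0 := by simp [pvIdx]
        have eu : pvIdx gU (a :: t) = 1 + pvIdx gU t := by simp [pvIdx, hu']
        have h1 := pvIdx_nonneg gU t
        simp only [pvLoopA, hu', Bool.false_eq_true, if_false, beq_self_eq_true, if_true,
          eq0, eu]
        symm
        simp only [decide_eq_false_iff_not]
        omega
      · have hq' : (a == gQ) = false := by simp [hq]
        have hmem : gU ∈ t ∨ gQ ∈ t := by
          rcases h with h | h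
          · left; rcases List.mem_cons.mp h with h | h
            · exact absurd h.symm hu
            · exact h
          · right; rcases List.mem_cons.mp h with h | h
            · exact absurd h.symm hq
            · exact h
        have eu : pvIdx gU (a :: t) = 1 + pvIdx gU t := by simp [pvIdx, hu']
        have eq' : pvIdx gQ (a :: t) = 1 + pvIdx gQ t := by simp [pvIdx, hq']
        simp only [pvLoopA, hu', hq', Bool.false_eq_true, if_false, ih hmem, eu, eq']
        congr 1
        simp only [eq_iff_iff]
        omega

-- B's rank dictionary looks up the first-occurrence index (8 for absent grades)
theorem pvRank_getD (g : String) :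
    ((PySem.List.enumerate (["5**", "5*", "5", "4", "3", "2", "1", "U"] : List String)).foldl
        (fun d p => d.insert p.2 p.1) PySem.Dict.empty).getD g 8 =
      pvIdx g ["5**", "5*", "5", "4", "3", "2", "1", "U"] := by
  by_cases h1 : g = "5**"; · subst h1; decide
  by_cases h2 : g = "5*"; · subst h2; decide
  by_cases h3 : g = "5"; · subst h3; decide
  by_cases h4 : g = "4"; · subst h4; decide
  by_cases h5 : g = "3"; · subst h5; decide
  by_cases h6 : g = "2"; · subst h6; decide
  by_cases h7 : g = "1"; · subst h7; decide
  by_cases h8 : g = "U"; · subst h8; decide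
  have e : pvIdx g ["5**", "5*", "5", "4", "3", "2", "1", "U"] = 8 := by
    simp [pvIdx, Ne.symm h1, Ne.symm h2, Ne.symm h3, Ne.symm h4,
      Ne.symm h5, Ne.symm h6, Ne.symm h7, Ne.symm h8]
  rw [e]
  simp only [PySem.List.enumerate_cons, PySem.List.enumerate_nil, List.foldl]
  rw [PySem.Dict.getD_insert, PySem.Dict.getD_insert, PySem.Dict.getD_insert,
    PySem.Dict.getD_insert, PySem.Dict.getD_insert, PySem.Dict.getD_insert,
    PySem.Dict.getD_insert, PySem.Dict.getD_insert]
  simp [h1, h2, h3, h4, h5, h6, h7, h8, PySem.Dict.getD_empty]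

-- ===== VERDICT (by name: the statement is the Claim_ definition above) =====
theorem qualiMapping_spec : Claim_equal_qualiMapping := by
  intro exam gQ gU _ hpre
  unfold Spec_qualiMapping qualiMapping qualiMapping_alt
  by_cases he : exam = "HKDSE"
  · subst he
    simp only [beq_self_eq_true, if_true, bne_self_eq_false, Bool.false_eq_true, if_false]
    rw [pvLoopA_eq_idx _ _ _ (hpre rfl)]
    rw [show (( ["5**", "5*", "5", "4", "3", "2", "1", "U"] : List String).length : Int) = 8 from rfl]
    rw [pvRank_getD, pvRank_getD]
  · simp [he]
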